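-- pv_equiv track=rewrite | github.com/TiboCERI/Gr4GL_TD3L3 | gl.py | Biblio
-- ===== SOURCE A (Python) =====
-- def Biblio(normalContent):
--     lowerContent = normalContent.lower()
--     if " references" in lowerContent:
--         indexFound = lowerContent.find("\nreferences\n")
--     else:
--         indexFound = lowerContent.find("references\n")
--     if indexFound == -1 :
--         return "bibliography not found"
--     indexFound += len("references\n")
--     normalContent = normalContent[indexFound:]
--     indexFound = normalContent.find("\n\n");
--     if indexFound == -1 :
--         return "bibliography not found"
--     normalContent = normalContent[:indexFound]
--     if "[1]" in normalContent:
--         contentOnLine = normalContent.replace(".\n","  ;  ").replace("\n"," ")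
--         contentOnLine = contentOnLine.replace(";", "\n")
--         return contentOnLine
--     elif "(2013)" in normalContent:
--         normalContent = normalContent.replace("\n"," ")
--         for i in range(1900,2020):
--             if str(i) in normalContent:
--                 a = "("+str(i)+")"
--                 b = "("+str(i)+")\n"
--
--                 normalContent = normalContent.replace(a, b)
--         return normalContent
--     else:
--         normalContent = normalContent.replace("\n"," ")
--         for i in range(1900,2020):
--             if str(i) in normalContent:
--                 a = str(i)+"."
--                 b = str(i)+".\n"
--
--
--                 normalContent = normalContent.replace(a, b)
--         return normalContent
-- ===== SOURCE B (Python) =====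
-- # B: same header-location/truncation and "[1]" branch, but the 120-pass year-replace
-- # loops become ONE left-to-right scan that recognises pre+"YYYY"+post (1900<=YYYY<=2019)
-- # with an arithmetic range test and inserts "\n" after each occurrence.
--
-- def _annotate(s, pre, post):
--     L = len(pre) + 4 + len(post)
--     out = []
--     i, n = 0, len(s)
--     while i < n:
--         ds = s[i + len(pre):i + len(pre) + 4]
--         if (s[i:i + len(pre)] == pre and len(ds) == 4 and ds.isdigit()
--                 and s[i + len(pre) + 4:i + L] == post and len(s) >= i + L
--                 and 1900 <= int(ds) <= 2019):
--             out.append(s[i:i + L] + "\n")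
--             i += L
--         else:
--             out.append(s[i])
--             i += 1
--     return "".join(out)
--
--
-- def Biblio(normalContent):
--     lowerContent = normalContent.lower()
--     needle = "\nreferences\n" if " references" in lowerContent else "references\n"
--     idx = lowerContent.find(needle)
--     if idx == -1:
--         return "bibliography not found"
--     rest = normalContent[idx + len("references\n"):]
--     end = rest.find("\n\n")
--     if end == -1:
--         return "bibliography not found"
--     rest = rest[:end]
--     if "[1]" in rest:
--         return rest.replace(".\n", "  ;  ").replace("\n", " ").replace(";", "\n")
--     if "(2013)" in rest:
--         return _annotate(rest.replace("\n", " "), "(", ")")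
--     return _annotate(rest.replace("\n", " "), "", ".")
-- ===== Notes on version B (the rewrite author's own statement) =====
-- stated objective: alternative
-- what changed: The two `for i in range(1900,2020)` loops of guarded str.replace passes (up to 120 full scans of the references block per branch) are replaced by a single left-to-right scan that recognises a parenthesised or dot-terminated four-digit year with an arithmetic range test on int(ds) and inserts the newline in one pass; the header search is folded into one find on a selected needle.
import Mathlib
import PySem

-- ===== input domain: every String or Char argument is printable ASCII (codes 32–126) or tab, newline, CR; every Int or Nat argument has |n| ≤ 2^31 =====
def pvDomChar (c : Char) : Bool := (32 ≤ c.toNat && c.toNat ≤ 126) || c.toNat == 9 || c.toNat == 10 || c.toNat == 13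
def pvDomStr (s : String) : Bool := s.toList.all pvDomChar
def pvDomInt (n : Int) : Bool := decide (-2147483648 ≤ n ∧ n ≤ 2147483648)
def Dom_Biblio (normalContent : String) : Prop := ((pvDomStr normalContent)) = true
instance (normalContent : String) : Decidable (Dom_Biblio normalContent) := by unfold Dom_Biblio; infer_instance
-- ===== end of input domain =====

-- B replaces A's 120 guarded `str.replace` passes over the references block by one
-- left-to-right scan that recognises pre+"YYYY"+post (1900 ≤ YYYY ≤ 2019) arithmetically.

-- ===== PORT A =====
-- A works on the code-point list; the String result is rebuilt at the end.
def pvYears : List Int := PySem.List.pyRange 1900 2020 1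

-- `for i in range(1900,2020): if str(i) in s: s = s.replace("("+str(i)+")", "("+str(i)+")\n")`
def pvAParen (s : List Char) : List Char :=
  pvYears.foldl (fun s i =>
    if PySem.Chars.isIn (PySem.Int.toChars i) s then
      PySem.Chars.replace s ('(' :: (PySem.Int.toChars i ++ [')']))
        ('(' :: (PySem.Int.toChars i ++ [')', '\n']))
    else s) s

-- `for i in range(1900,2020): if str(i) in s: s = s.replace(str(i)+".", str(i)+".\n")`
def pvADot (s : List Char) : List Char :=
  pvYears.foldl (fun s i =>
    if PySem.Chars.isIn (PySem.Int.toChars i) s then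
      PySem.Chars.replace s (PySem.Int.toChars i ++ ['.'])
        (PySem.Int.toChars i ++ ['.', '\n'])
    else s) s

def pvACore (l : List Char) : List Char :=
  let lowerContent := PySem.Chars.lower l
  let indexFound :=
    if PySem.Chars.isIn " references".toList lowerContent then
      PySem.Chars.find lowerContent "\nreferences\n".toList
    else
      PySem.Chars.find lowerContent "references\n".toList
  if indexFound = -1 then "bibliography not found".toList
  else
    let l1 := PySem.Chars.slice l (some (indexFound + 11)) none
    let j := PySem.Chars.find l1 "\n\n".toList
    if j = -1 then "bibliography not found".toList
    else
      let l2 := PySem.Chars.slice l1 none (some j)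
      if PySem.Chars.isIn "[1]".toList l2 then
        PySem.Chars.replace
          (PySem.Chars.replace (PySem.Chars.replace l2 ".\n".toList "  ;  ".toList)
            "\n".toList " ".toList) ";".toList "\n".toList
      else if PySem.Chars.isIn "(2013)".toList l2 then
        pvAParen (PySem.Chars.replace l2 "\n".toList " ".toList)
      else
        pvADot (PySem.Chars.replace l2 "\n".toList " ".toList)

def Biblio (normalContent : String) : String := String.ofList (pvACore normalContent.toList)

-- ===== PORT B =====
-- int(ds) of Source B on the four (guarded-digit) chars, as arithmetic on code points
def pvVal (a b c d : Char) : Int :=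
  (((a.toNat - 48) * 1000 + (b.toNat - 48) * 100 + (c.toNat - 48) * 10 + (d.toNat - 48) : Nat) : Int)

def pvL (pre post : List Char) : Nat := pre.length + 4 + post.length

-- the combined test of Source B's `_annotate`: s[i:] starts with pre, then 4 digits whose
-- value lies in [lo,hi], then post
def pvMatch (pre post : List Char) (lo hi : Int) (s : List Char) : Bool :=
  pre.isPrefixOf s &&
  (match s.drop pre.length with
   | a :: b :: c :: d :: r =>
     PySem.Chars.isdigit a && PySem.Chars.isdigit b && PySem.Chars.isdigit c &&
       PySem.Chars.isdigit d && post.isPrefixOf r &&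
       decide (lo ≤ pvVal a b c d) && decide (pvVal a b c d ≤ hi)
   | _ => false)

-- Source B `_annotate`: the while-loop over i becomes recursion on the remaining list
def pvScanG (pre post : List Char) (lo hi : Int) : List Char → List Char
  | [] => []
  | ch :: t =>
    if pvMatch pre post lo hi (ch :: t) then
      (ch :: t).take (pvL pre post) ++ '\n' :: pvScanG pre post lo hi ((ch :: t).drop (pvL pre post))
    else ch :: pvScanG pre post lo hi t
  termination_by l => l.length
  decreasing_by
    · simp [pvL]; omega
    · simp

def pvBCore (l : List Char) : List Char :=
  let lowerContent := PySem.Chars.lower l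
  let needle :=
    if PySem.Chars.isIn " references".toList lowerContent then "\nreferences\n".toList
    else "references\n".toList
  let idx := PySem.Chars.find lowerContent needle
  if idx = -1 then "bibliography not found".toList
  else
    let rest := PySem.Chars.slice l (some (idx + 11)) none
    let e := PySem.Chars.find rest "\n\n".toList
    if e = -1 then "bibliography not found".toList
    else
      let rest2 := PySem.Chars.slice rest none (some e)
      if PySem.Chars.isIn "[1]".toList rest2 then
        PySem.Chars.replace
          (PySem.Chars.replace (PySem.Chars.replace rest2 ".\n".toList "  ;  ".toList)
            "\n".toList " ".toList) ";".toList "\n".toList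
      else if PySem.Chars.isIn "(2013)".toList rest2 then
        pvScanG ['('] [')'] 1900 2019 (PySem.Chars.replace rest2 "\n".toList " ".toList)
      else
        pvScanG [] ['.'] 1900 2019 (PySem.Chars.replace rest2 "\n".toList " ".toList)

def Biblio_alt (normalContent : String) : String := String.ofList (pvBCore normalContent.toList)

-- ===== PRECONDITION & SPEC =====
def Spec_Biblio (normalContent : String) (out : String) : Prop := out = Biblio_alt normalContent
instance (normalContent : String) (out : String) : Decidable (Spec_Biblio normalContent out) := by unfold Spec_Biblio; infer_instance

-- ===== CLAIM (what is proved, stated in full; the proofs are below) =====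
def Claim_equal_Biblio : Prop := ∀ (normalContent : String), Dom_Biblio normalContent → Spec_Biblio normalContent (Biblio normalContent)

-- ===== LEMMAS AND PROOFS =====

-- the four decimal digit characters of y (for 1000 ≤ y ≤ 9999, = str(y))
def chars4 (y : Int) : List Char :=
  [Char.ofNat (48 + y.toNat / 1000 % 10), Char.ofNat (48 + y.toNat / 100 % 10),
   Char.ofNat (48 + y.toNat / 10 % 10), Char.ofNat (48 + y.toNat % 10)]

-- clean recursion equivalent of Python str.replace (old ≠ [])
def repl (old new : List Char) : List Char → List Char
  | [] => []
  | c :: t =>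
    if old.isPrefixOf (c :: t) then new ++ repl old new (t.drop (old.length - 1))
    else c :: repl old new t
  termination_by l => l.length
  decreasing_by
    · simp
    · simp

-- "shape" match: pre, four digits, post — any year value
def shp (pre post : List Char) (s : List Char) : Bool := pvMatch pre post 0 9999 s

theorem digit_bounds {c : Char} (h : PySem.Chars.isdigit c = true) : 48 ≤ c.toNat ∧ c.toNat ≤ 57 := by
  simp only [PySem.Chars.isdigit, Bool.and_eq_true, decide_eq_true_eq, Char.le_def] at h
  exact ⟨UInt32.le_iff_toNat_le.mp h.1, UInt32.le_iff_toNat_le.mp h.2⟩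

theorem ofNat_digit_toNat {d : Nat} (h : d < 10) : (Char.ofNat (48 + d)).toNat = 48 + d := by
  interval_cases d <;> decide

theorem ofNat_digit_isdigit {d : Nat} (h : d < 10) :
    PySem.Chars.isdigit (Char.ofNat (48 + d)) = true := by
  interval_cases d <;> decide

set_option maxRecDepth 10000 in
theorem toChars_eq_chars4 : ∀ y ∈ pvYears, PySem.Int.toChars y = chars4 y := by decide

theorem chars4_val (y : Int) (h1 : 1000 ≤ y) (h2 : y ≤ 9999) :
    pvVal (Char.ofNat (48 + y.toNat / 1000 % 10)) (Char.ofNat (48 + y.toNat / 100 % 10))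
      (Char.ofNat (48 + y.toNat / 10 % 10)) (Char.ofNat (48 + y.toNat % 10)) = y := by
  unfold pvVal
  rw [ofNat_digit_toNat (by omega), ofNat_digit_toNat (by omega),
    ofNat_digit_toNat (by omega), ofNat_digit_toNat (by omega)]
  omega

theorem chars4_of_val {a b c d : Char} {y : Int}
    (ha : PySem.Chars.isdigit a = true) (hb : PySem.Chars.isdigit b = true)
    (hc : PySem.Chars.isdigit c = true) (hd : PySem.Chars.isdigit d = true)
    (hv : pvVal a b c d = y) : chars4 y = [a, b, c, d] := by
  obtain ⟨ha1, ha2⟩ := digit_bounds ha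
  obtain ⟨hb1, hb2⟩ := digit_bounds hb
  obtain ⟨hc1, hc2⟩ := digit_bounds hc
  obtain ⟨hd1, hd2⟩ := digit_bounds hd
  unfold pvVal at hv
  have e1 : 48 + y.toNat / 1000 % 10 = a.toNat := by omega
  have e2 : 48 + y.toNat / 100 % 10 = b.toNat := by omega
  have e3 : 48 + y.toNat / 10 % 10 = c.toNat := by omega
  have e4 : 48 + y.toNat % 10 = d.toNat := by omega
  simp [chars4, e1, e2, e3, e4, Char.ofNat_toNat]

theorem val_bounds {a b c d : Char}
    (ha : PySem.Chars.isdigit a = true) (hb : PySem.Chars.isdigit b = true)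
    (hc : PySem.Chars.isdigit c = true) (hd : PySem.Chars.isdigit d = true) :
    0 ≤ pvVal a b c d ∧ pvVal a b c d ≤ 9999 := by
  obtain ⟨ha1, ha2⟩ := digit_bounds ha
  obtain ⟨hb1, hb2⟩ := digit_bounds hb
  obtain ⟨hc1, hc2⟩ := digit_bounds hc
  obtain ⟨hd1, hd2⟩ := digit_bounds hd
  unfold pvVal
  omega

theorem nl_not_mem_chars4 (y : Int) : '\n' ∉ chars4 y := by
  intro h
  have h10 : ('\n').toNat = 10 := rfl
  simp only [chars4, List.mem_cons, List.not_mem_nil, or_false] at h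
  rcases h with h | h | h | h <;>
    (have h2 := congrArg Char.toNat h; rw [ofNat_digit_toNat (by omega)] at h2; omega)

-- unfolding equations
theorem repl_cons (old new : List Char) (c : Char) (t : List Char) :
    repl old new (c :: t) =
      if old.isPrefixOf (c :: t) then new ++ repl old new (t.drop (old.length - 1))
      else c :: repl old new t := by
  rw [repl]

theorem scan_cons (pre post : List Char) (lo hi : Int) (ch : Char) (t : List Char) :
    pvScanG pre post lo hi (ch :: t) =
      if pvMatch pre post lo hi (ch :: t) then
        (ch :: t).take (pvL pre post) ++ '\n' :: pvScanG pre post lo hi ((ch :: t).drop (pvL pre post))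
      else ch :: pvScanG pre post lo hi t := by
  rw [pvScanG]

theorem pvMatch_extract {pre post : List Char} {lo hi : Int} {s : List Char}
    (h : pvMatch pre post lo hi s = true) :
    ∃ a b c d t, s = pre ++ a :: b :: c :: d :: (post ++ t) ∧
      PySem.Chars.isdigit a = true ∧ PySem.Chars.isdigit b = true ∧
      PySem.Chars.isdigit c = true ∧ PySem.Chars.isdigit d = true ∧
      lo ≤ pvVal a b c d ∧ pvVal a b c d ≤ hi := by
  unfold pvMatch at h
  rw [Bool.and_eq_true] at h
  obtain ⟨hp, hm⟩ := h
  obtain ⟨u, hu⟩ := List.isPrefixOf_iff_prefix.mp hp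
  rw [← hu, List.drop_left] at hm
  rcases u with _ | ⟨a, _ | ⟨b, _ | ⟨c, _ | ⟨d, r⟩⟩⟩⟩ <;>
    simp only [Bool.and_eq_true, decide_eq_true_eq, Bool.false_eq_true] at hm
  obtain ⟨⟨⟨⟨⟨⟨ha, hb⟩, hc⟩, hd⟩, hr⟩, h1⟩, h2⟩ := hm
  obtain ⟨t, ht⟩ := List.isPrefixOf_iff_prefix.mp hr
  exact ⟨a, b, c, d, t, by rw [← hu, ← ht], ha, hb, hc, hd, h1, h2⟩

theorem pvMatch_build (pre post : List Char) (lo hi : Int) {a b c d : Char} (t : List Char)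
    (ha : PySem.Chars.isdigit a = true) (hb : PySem.Chars.isdigit b = true)
    (hc : PySem.Chars.isdigit c = true) (hd : PySem.Chars.isdigit d = true)
    (h1 : lo ≤ pvVal a b c d) (h2 : pvVal a b c d ≤ hi) :
    pvMatch pre post lo hi (pre ++ a :: b :: c :: d :: (post ++ t)) = true := by
  unfold pvMatch
  rw [List.drop_left]
  simp [List.isPrefixOf_iff_prefix, List.prefix_append, ha, hb, hc, hd, h1, h2]

theorem repl_nil (old new : List Char) : repl old new [] = [] := by rw [repl]

theorem scan_nil (pre post : List Char) (lo hi : Int) : pvScanG pre post lo hi [] = [] := by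
  rw [pvScanG]

theorem replace_go_eq (old new : List Char) (h : old ≠ []) :
    ∀ fuel l acc, l.length ≤ fuel →
      PySem.Chars.replace.go old new fuel l acc = acc.reverse ++ repl old new l := by
  intro fuel
  induction fuel with
  | zero =>
    intro l acc hl
    have hnil : l = [] := by cases l <;> simp at hl ⊢
    subst hnil
    simp [PySem.Chars.replace.go, repl_nil]
  | succ fuel ih =>
    intro l acc hl
    cases l with
    | nil => simp [PySem.Chars.replace.go, repl_nil]
    | cons c t =>
      have hdp : (c :: t).drop old.length = t.drop (old.length - 1) := by
        cases old with
        | nil => exact absurd rfl h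
        | cons o os => simp
      by_cases hp : old.isPrefixOf (c :: t)
      · rw [show PySem.Chars.replace.go old new (fuel + 1) (c :: t) acc =
            (if old.isPrefixOf (c :: t) then
              PySem.Chars.replace.go old new fuel ((c :: t).drop old.length) (new.reverse ++ acc)
            else PySem.Chars.replace.go old new fuel t (c :: acc)) from rfl]
        rw [if_pos hp, hdp,
          ih (t.drop (old.length - 1)) (new.reverse ++ acc) (by simp at hl ⊢; omega)]
        rw [repl_cons, if_pos hp]
        simp
      · rw [show PySem.Chars.replace.go old new (fuel + 1) (c :: t) acc =
            (if old.isPrefixOf (c :: t) then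
              PySem.Chars.replace.go old new fuel ((c :: t).drop old.length) (new.reverse ++ acc)
            else PySem.Chars.replace.go old new fuel t (c :: acc)) from rfl]
        rw [if_neg hp, ih t (c :: acc) (by simp at hl ⊢; omega)]
        rw [repl_cons, if_neg hp]
        simp

theorem replace_eq_repl (old new s : List Char) (h : old ≠ []) :
    PySem.Chars.replace s old new = repl old new s := by
  unfold PySem.Chars.replace
  rw [if_neg (by simp [h]), replace_go_eq old new h s.length s [] le_rfl]
  simp

theorem repl_of_not_infix {old : List Char} (new : List Char) {l : List Char}
    (h : ¬ old <:+: l) : repl old new l = l := by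
  induction l with
  | nil => exact repl_nil old new
  | cons c t ih =>
    rw [repl_cons,
      if_neg (fun hp => h (List.infix_cons_iff.mpr (Or.inl (List.isPrefixOf_iff_prefix.mp hp))))]
    rw [ih (fun hi => h (List.infix_cons_iff.mpr (Or.inr hi)))]

theorem repl_skip (old new : List Char) (u v : List Char)
    (h : ∀ i < u.length, ¬ old <+: (u ++ v).drop i) :
    repl old new (u ++ v) = u ++ repl old new v := by
  induction u with
  | nil => simp
  | cons c u ih =>
    have h0 := h 0 (by simp)
    simp only [List.cons_append, List.drop_zero] at h0
    rw [List.cons_append, repl_cons,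
      if_neg (fun hp => h0 (List.isPrefixOf_iff_prefix.mp hp))]
    rw [ih (fun i hi => by
      have := h (i + 1) (by simp; omega)
      simpa using this)]
    simp

theorem scan_skip (pre post : List Char) (lo hi : Int) (u v : List Char)
    (h : ∀ i < u.length, pvMatch pre post lo hi ((u ++ v).drop i) = false) :
    pvScanG pre post lo hi (u ++ v) = u ++ pvScanG pre post lo hi v := by
  induction u with
  | nil => simp
  | cons c u ih =>
    have h0 := h 0 (by simp)
    simp only [List.cons_append, List.drop_zero] at h0
    rw [List.cons_append, scan_cons, if_neg (by simp [h0])]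
    rw [ih (fun i hi => by
      have := h (i + 1) (by simp; omega)
      simpa using this)]
    simp

theorem repl_head (old new w : List Char) (h : old ≠ []) :
    repl old new (old ++ w) = new ++ repl old new w := by
  cases old with
  | nil => exact absurd rfl h
  | cons o os =>
    rw [List.cons_append, repl_cons,
      if_pos (List.isPrefixOf_iff_prefix.mpr ⟨w, by simp⟩)]
    congr 1
    have : (o :: os).length - 1 = os.length := by simp
    rw [this, List.drop_left]

theorem no_prefix_in_block {old x : List Char} {L : Nat} (hnl : '\n' ∉ old)
    (hold : old.length = L) (hx : x.length = L) (r : List Char) {i : Nat}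
    (h1 : 1 ≤ i) (h2 : i ≤ L) :
    ¬ old <+: (x ++ '\n' :: r).drop i := by
  intro hpre
  obtain ⟨z, hz⟩ := hpre
  have hLi : ((x ++ '\n' :: r).drop i)[L - i]? = some '\n' := by
    rw [List.getElem?_drop]
    have hiL : i + (L - i) = L := by omega
    rw [hiL, List.getElem?_append_right (by omega)]
    simp [hx]
  rw [← hz, List.getElem?_append_left (by omega)] at hLi
  exact hnl (List.mem_of_getElem? hLi)

theorem match_le {pre post : List Char} {lo hi : Int} {s : List Char}
    (h : pvMatch pre post lo hi s = true) : lo ≤ hi := by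
  obtain ⟨a, b, c, d, t, _, _, _, _, _, h1, h2⟩ := pvMatch_extract h
  omega

theorem scan_empty_range (pre post : List Char) (lo hi : Int) (h : hi < lo) (s : List Char) :
    pvScanG pre post lo hi s = s := by
  have key : ∀ n (s : List Char), s.length ≤ n → pvScanG pre post lo hi s = s := by
    intro n
    induction n with
    | zero =>
      intro s hs
      have : s = [] := by cases s <;> simp at hs ⊢
      subst this
      exact scan_nil pre post lo hi
    | succ n ih =>
      intro s hs
      cases s with
      | nil => exact scan_nil pre post lo hi
      | cons c t =>
        rw [scan_cons, if_neg (fun hm => absurd (match_le hm) (by omega))]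
        rw [ih t (by simp at hs; omega)]
  exact key s.length s le_rfl

theorem match_nil_false (pre post : List Char) (lo hi : Int) :
    pvMatch pre post lo hi [] = false := by
  unfold pvMatch
  rw [List.drop_nil]
  simp

theorem scan_match {pre post : List Char} {lo hi : Int} {s : List Char}
    (h : pvMatch pre post lo hi s = true) :
    pvScanG pre post lo hi s =
      s.take (pvL pre post) ++ '\n' :: pvScanG pre post lo hi (s.drop (pvL pre post)) := by
  cases s with
  | nil => rw [match_nil_false] at h; cases h
  | cons c t => rw [scan_cons, if_pos h]

theorem shape_take (pre post : List Char) (a b c d : Char) (t : List Char) :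
    (pre ++ a :: b :: c :: d :: (post ++ t)).take (pvL pre post) =
      (pre ++ [a, b, c, d]) ++ post := by
  have e : pre ++ a :: b :: c :: d :: (post ++ t) = (pre ++ [a, b, c, d]) ++ (post ++ t) := by
    simp
  rw [e, List.take_append, List.take_of_length_le (by simp [pvL]),
    show pvL pre post - (pre ++ [a, b, c, d]).length = post.length by simp [pvL],
    List.take_left]

theorem shape_drop (pre post : List Char) (a b c d : Char) (t : List Char) :
    (pre ++ a :: b :: c :: d :: (post ++ t)).drop (pvL pre post) = t := by
  have e : pre ++ a :: b :: c :: d :: (post ++ t) = (pre ++ [a, b, c, d]) ++ (post ++ t) := by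
    simp
  rw [e, List.drop_append, List.drop_eq_nil_of_le (by simp [pvL]),
    show pvL pre post - (pre ++ [a, b, c, d]).length = post.length by simp [pvL],
    List.nil_append, List.drop_left]

theorem prefix_block_eq {old E : List Char} (hlen : old.length = E.length)
    {w : List Char} (h : old <+: E ++ w) : old = E := by
  obtain ⟨z, hz⟩ := h
  have h1 : (old ++ z).take old.length = old := List.take_left
  rw [hz, hlen, List.take_left] at h1
  exact h1.symm

theorem mid_eq {pre post X Y : List Char} (h : pre ++ X ++ post = pre ++ Y ++ post) : X = Y := by
  rw [List.append_assoc, List.append_assoc] at h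
  exact List.append_cancel_right (List.append_cancel_left h)

theorem match_widen {pre post : List Char} {lo y : Int} {s : List Char}
    (h : pvMatch pre post lo (y - 1) s = true) : pvMatch pre post lo y s = true := by
  obtain ⟨a, b, c, d, t, rfl, ha, hb, hc, hd, h1, h2⟩ := pvMatch_extract h
  exact pvMatch_build pre post lo y t ha hb hc hd h1 (by omega)

theorem match_widen2 {pre post : List Char} {lo y : Int} (hlo : lo ≤ y) {s : List Char}
    (h : pvMatch pre post y y s = true) : pvMatch pre post lo y s = true := by
  obtain ⟨a, b, c, d, t, rfl, ha, hb, hc, hd, h1, h2⟩ := pvMatch_extract h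
  exact pvMatch_build pre post lo y t ha hb hc hd (by omega) h2

theorem match_split {pre post : List Char} {lo y : Int} {s : List Char}
    (h : pvMatch pre post lo y s = true) :
    pvMatch pre post lo (y - 1) s = true ∨ pvMatch pre post y y s = true := by
  obtain ⟨a, b, c, d, t, rfl, ha, hb, hc, hd, h1, h2⟩ := pvMatch_extract h
  by_cases hv : pvVal a b c d ≤ y - 1
  · exact Or.inl (pvMatch_build pre post lo (y - 1) t ha hb hc hd h1 hv)
  · exact Or.inr (pvMatch_build pre post y y t ha hb hc hd (by omega) (by omega))

theorem shp_of_match {pre post : List Char} {lo hi : Int} {s : List Char}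
    (h : pvMatch pre post lo hi s = true) : shp pre post s = true := by
  obtain ⟨a, b, c, d, t, rfl, ha, hb, hc, hd, h1, h2⟩ := pvMatch_extract h
  obtain ⟨hv0, hv1⟩ := val_bounds ha hb hc hd
  exact pvMatch_build pre post 0 9999 t ha hb hc hd hv0 hv1

theorem match_of_old_prefix (pre post : List Char) {lo hi y : Int} (h1000 : 1000 ≤ y)
    (h9999 : y ≤ 9999) (hlo : lo ≤ y) (hhi : y ≤ hi) (w : List Char) :
    pvMatch pre post lo hi ((pre ++ chars4 y ++ post) ++ w) = true := by
  have hv := chars4_val y h1000 h9999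
  rw [show (pre ++ chars4 y ++ post) ++ w =
      pre ++ (Char.ofNat (48 + y.toNat / 1000 % 10)) :: (Char.ofNat (48 + y.toNat / 100 % 10)) ::
        (Char.ofNat (48 + y.toNat / 10 % 10)) :: (Char.ofNat (48 + y.toNat % 10)) ::
        (post ++ w) by simp [chars4]]
  exact pvMatch_build pre post lo hi w (ofNat_digit_isdigit (by omega))
    (ofNat_digit_isdigit (by omega)) (ofNat_digit_isdigit (by omega))
    (ofNat_digit_isdigit (by omega)) (by omega) (by omega)

theorem old_length (pre post : List Char) (y : Int) :
    (pre ++ chars4 y ++ post).length = pvL pre post := by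
  simp [chars4, pvL]; omega

theorem nl_not_mem_old (pre post : List Char) (y : Int)
    (Hnlp : '\n' ∉ pre) (Hnlq : '\n' ∉ post) : '\n' ∉ pre ++ chars4 y ++ post := by
  intro h
  rcases List.mem_append.mp h with h | h
  · rcases List.mem_append.mp h with h | h
    · exact Hnlp h
    · exact nl_not_mem_chars4 y h
  · exact Hnlq h

theorem suffix_eq_take {old z : List Char} {c : Char} {u E W : List Char} {L i0 : Nat}
    (hz : old ++ z = c :: (u ++ (E ++ '\n' :: W))) (hu : u.length = i0) (hE : E.length = L)
    (hold : old.length = L) (hi0 : i0 + 1 < L) :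
    old.drop (i0 + 1) = E.take (L - (i0 + 1)) := by
  apply List.ext_getElem?
  intro j
  rw [List.getElem?_drop, List.getElem?_take]
  by_cases hj : j < L - (i0 + 1)
  · rw [if_pos hj]
    have h1 : old[i0 + 1 + j]? = (old ++ z)[i0 + 1 + j]? :=
      (List.getElem?_append_left (by omega)).symm
    rw [h1, hz, show i0 + 1 + j = (i0 + j) + 1 by omega, List.getElem?_cons_succ,
      List.getElem?_append_right (by omega), show i0 + j - u.length = j by omega,
      List.getElem?_append_left (by omega)]
  · rw [if_neg hj, List.getElem?_eq_none (by omega)]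

-- the key step: one more `replace` pass over the scanned string extends the year range by one
set_option maxHeartbeats 1000000 in
theorem repl_scan_step (pre post : List Char)
    (Hnlp : '\n' ∉ pre) (Hnlq : '\n' ∉ post)
    (Hov : ∀ s j, shp pre post s = true → 1 ≤ j → j < pvL pre post →
      shp pre post (s.drop j) = false)
    (lo y : Int) (hlo : 1000 ≤ lo) (hy : lo ≤ y) (hy2 : y ≤ 9999) (s : List Char) :
    repl (pre ++ chars4 y ++ post) (pre ++ chars4 y ++ post ++ ['\n'])
      (pvScanG pre post lo (y - 1) s) = pvScanG pre post lo y s := by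
  have hLold := old_length pre post y
  have hnl := nl_not_mem_old pre post y Hnlp Hnlq
  have hL4 : 4 ≤ pvL pre post := by simp [pvL]; omega
  have key : ∀ n, ∀ s : List Char, s.length ≤ n →
      repl (pre ++ chars4 y ++ post) (pre ++ chars4 y ++ post ++ ['\n'])
        (pvScanG pre post lo (y - 1) s) = pvScanG pre post lo y s := by
    intro n
    induction n with
    | zero =>
      intro s hs
      have : s = [] := by cases s <;> simp at hs ⊢
      subst this
      rw [scan_nil, repl_nil, scan_nil]
    | succ n ih =>
      intro s hs
      by_cases h1 : pvMatch pre post lo (y - 1) s = true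
      · -- CASE 1: a year < y matches at the head: skip over the emitted block
        obtain ⟨a, b, c, d, t, rfl, ha, hb, hc, hd, hl1, hh1⟩ := pvMatch_extract h1
        have htake := shape_take pre post a b c d t
        have hdrop := shape_drop pre post a b c d t
        have hE : ((pre ++ [a, b, c, d]) ++ post).length = pvL pre post := by
          simp [pvL]; omega
        have htlen : t.length ≤ n := by simp at hs; omega
        have hskip : ∀ i, i < (((pre ++ [a, b, c, d]) ++ post) ++ ['\n']).length →
            ¬ (pre ++ chars4 y ++ post) <+:
              ((((pre ++ [a, b, c, d]) ++ post) ++ ['\n']) ++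
                pvScanG pre post lo (y - 1) t).drop i := by
          intro i hi
          simp only [List.length_append, List.length_cons, List.length_nil, hE] at hi
          rw [show (((pre ++ [a, b, c, d]) ++ post) ++ ['\n']) ++ pvScanG pre post lo (y - 1) t =
            ((pre ++ [a, b, c, d]) ++ post) ++ '\n' :: pvScanG pre post lo (y - 1) t by simp]
          rcases Nat.eq_zero_or_pos i with rfl | hip
          · rw [List.drop_zero]
            intro hp
            have hEeq : pre ++ chars4 y ++ post = (pre ++ [a, b, c, d]) ++ post :=
              prefix_block_eq (E := (pre ++ [a, b, c, d]) ++ post) (by rw [hLold, hE]) hp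
            have hmid : chars4 y = [a, b, c, d] :=
              mid_eq (pre := pre) (post := post) (by simpa [List.append_assoc] using hEeq)
            have hv := chars4_val y (by omega) (by omega)
            have hvy : pvVal a b c d = y := by
              simp only [chars4, List.cons.injEq, and_true] at hmid
              obtain ⟨e1, e2, e3, e4⟩ := hmid
              rw [← e1, ← e2, ← e3, ← e4]
              exact hv
            omega
          · exact no_prefix_in_block hnl hLold hE _ hip (by omega)
        rw [scan_match h1, scan_match (match_widen h1), htake, hdrop]
        rw [show ((pre ++ [a, b, c, d]) ++ post) ++ '\n' :: pvScanG pre post lo (y - 1) t =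
          (((pre ++ [a, b, c, d]) ++ post) ++ ['\n']) ++ pvScanG pre post lo (y - 1) t by simp]
        rw [repl_skip _ _ _ _ hskip, ih t htlen]
        simp
      · by_cases h2 : pvMatch pre post y y s = true
        · -- CASE 2: exactly year y matches at the head: this replace pass fires here
          obtain ⟨a, b, c, d, t, rfl, ha, hb, hc, hd, hl2, hh2⟩ := pvMatch_extract h2
          have hc4 : chars4 y = [a, b, c, d] := chars4_of_val ha hb hc hd (by omega)
          have htake := shape_take pre post a b c d t
          have hdrop := shape_drop pre post a b c d t
          have htlen : t.length ≤ n := by simp at hs; omega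
          have hold_eq : pre ++ chars4 y ++ post = (pre ++ [a, b, c, d]) ++ post := by
            rw [hc4, List.append_assoc]
          have hsplit : pvScanG pre post lo (y - 1) (pre ++ a :: b :: c :: d :: (post ++ t)) =
              ((pre ++ [a, b, c, d]) ++ post) ++ pvScanG pre post lo (y - 1) t := by
            have e : pre ++ a :: b :: c :: d :: (post ++ t) =
                ((pre ++ [a, b, c, d]) ++ post) ++ t := by simp
            rw [e, scan_skip pre post lo (y - 1) _ _ ?hyp]
            case hyp =>
              intro i hi
              have hiL : i < pvL pre post := by
                simp only [List.length_append, List.length_cons, List.length_nil] at hi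
                simp only [pvL]; omega
              rw [← e]
              rcases Nat.eq_zero_or_pos i with rfl | hip
              · rw [List.drop_zero]
                simpa using h1
              · by_cases hbt : pvMatch pre post lo (y - 1)
                    ((pre ++ a :: b :: c :: d :: (post ++ t)).drop i) = true
                · exact absurd (shp_of_match hbt)
                    (by rw [Hov _ i (shp_of_match h2) hip hiL]; simp)
                · simpa using hbt
          rw [hsplit, ← hold_eq, repl_head _ _ _ (by simp [chars4]), ih t htlen]
          rw [scan_match (match_widen2 hy h2), htake, hdrop]
          simp [hc4]
        · -- CASE 3: no match at the head
          cases s with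
          | nil => rw [scan_nil, repl_nil, scan_nil]
          | cons c t =>
            have h3 : pvMatch pre post lo y (c :: t) = false := by
              by_cases hbt : pvMatch pre post lo y (c :: t) = true
              · rcases match_split hbt with hx | hx
                · exact absurd hx h1
                · exact absurd hx h2
              · simpa using hbt
            have h1f : pvMatch pre post lo (y - 1) (c :: t) = false := by simpa using h1
            have htlen : t.length ≤ n := by simp at hs; omega
            rw [scan_cons pre post lo (y - 1), if_neg (by simp [h1f]),
              scan_cons pre post lo y, if_neg (by simp [h3])]
            rw [repl_cons, if_neg ?nopref, ih t htlen]
            case nopref =>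
              intro hpb
              have hp : (pre ++ chars4 y ++ post) <+: c :: pvScanG pre post lo (y - 1) t :=
                List.isPrefixOf_iff_prefix.mp hpb
              by_cases hex : ∃ i, i < pvL pre post - 1 ∧
                  pvMatch pre post lo (y - 1) (t.drop i) = true
              · -- the window would overlap a later emitted block: impossible
                obtain ⟨hi0L, hP⟩ := Nat.find_spec hex
                obtain ⟨a, b, c2, d2, t', hdi, ha, hb, hc2, hd2, hl', hh'⟩ := pvMatch_extract hP
                have hi0t : Nat.find hex ≤ t.length := by
                  by_contra hgt
                  rw [not_le] at hgt
                  rw [List.drop_eq_nil_of_le (by omega)] at hdi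
                  exact absurd hdi.symm (by simp)
                have hsk := scan_skip pre post lo (y - 1) (t.take (Nat.find hex))
                  (t.drop (Nat.find hex)) ?hu
                case hu =>
                  intro i hi
                  rw [List.take_append_drop]
                  simp only [List.length_take] at hi
                  by_cases hbt : pvMatch pre post lo (y - 1) (t.drop i) = true
                  · exact absurd ⟨by omega, hbt⟩ (Nat.find_min hex (by omega))
                  · simpa using hbt
                rw [List.take_append_drop] at hsk
                have hsm := scan_match hP
                rw [hdi, shape_take, shape_drop] at hsm
                rw [hdi] at hsk
                rw [hsm] at hsk
                rw [hsk] at hp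
                obtain ⟨z, hz⟩ := hp
                have hE2 : ((pre ++ [a, b, c2, d2]) ++ post).length = pvL pre post := by
                  simp [pvL]; omega
                have htk : (t.take (Nat.find hex)).length = Nat.find hex := by
                  rw [List.length_take]; exact min_eq_left hi0t
                have hsfx := suffix_eq_take hz htk hE2 hLold (by omega)
                have hshp1 : shp pre post ((pre ++ chars4 y ++ post) ++
                    ((pre ++ [a, b, c2, d2]) ++ post).drop
                      (pvL pre post - (Nat.find hex + 1))) = true :=
                  match_of_old_prefix pre post (by omega) (by omega) (by omega) (by omega) _
                have hdropw : ((pre ++ chars4 y ++ post) ++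
                    ((pre ++ [a, b, c2, d2]) ++ post).drop
                      (pvL pre post - (Nat.find hex + 1))).drop (Nat.find hex + 1) =
                    (pre ++ [a, b, c2, d2]) ++ post := by
                  rw [List.drop_append_of_le_length (by omega), hsfx, List.take_append_drop]
                have hovw := Hov _ (Nat.find hex + 1) hshp1 (by omega) (by omega)
                rw [hdropw] at hovw
                have hshp2 : shp pre post ((pre ++ [a, b, c2, d2]) ++ post) = true := by
                  rw [show (pre ++ [a, b, c2, d2]) ++ post =
                    pre ++ a :: b :: c2 :: d2 :: (post ++ []) by simp]
                  obtain ⟨hv0, hv1⟩ := val_bounds ha hb hc2 hd2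
                  exact pvMatch_build pre post 0 9999 [] ha hb hc2 hd2 hv0 hv1
                rw [hshp2] at hovw
                cases hovw
              · -- no later block is reached: the window would be a year-y match at the head
                have hex' : ∀ i, i < pvL pre post - 1 →
                    pvMatch pre post lo (y - 1) (t.drop i) = false := by
                  intro i hi
                  by_cases hbt : pvMatch pre post lo (y - 1) (t.drop i) = true
                  · exact absurd ⟨i, hi, hbt⟩ hex
                  · simpa using hbt
                have hsk := scan_skip pre post lo (y - 1) (t.take (pvL pre post - 1))
                  (t.drop (pvL pre post - 1)) ?hu2
                case hu2 =>
                  intro i hi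
                  rw [List.take_append_drop]
                  simp only [List.length_take] at hi
                  exact hex' i (by omega)
                rw [List.take_append_drop] at hsk
                rw [hsk] at hp
                by_cases hlen : pvL pre post - 1 ≤ t.length
                · have htk : (t.take (pvL pre post - 1)).length = pvL pre post - 1 := by
                    simp [List.length_take]; omega
                  have hold_take : pre ++ chars4 y ++ post = c :: t.take (pvL pre post - 1) := by
                    refine prefix_block_eq
                      (w := pvScanG pre post lo (y - 1) (t.drop (pvL pre post - 1))) ?_ ?_
                    · rw [hLold, List.length_cons, htk]
                      omega
                    · rw [show c :: (t.take (pvL pre post - 1) ++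
                        pvScanG pre post lo (y - 1) (t.drop (pvL pre post - 1))) =
                        (c :: t.take (pvL pre post - 1)) ++
                          pvScanG pre post lo (y - 1) (t.drop (pvL pre post - 1)) from rfl] at hp
                      exact hp
                  have hs_eq : c :: t = (pre ++ chars4 y ++ post) ++ t.drop (pvL pre post - 1) := by
                    conv_lhs => rw [← List.take_append_drop (pvL pre post - 1) t]
                    rw [show c :: (t.take (pvL pre post - 1) ++ t.drop (pvL pre post - 1)) =
                      (c :: t.take (pvL pre post - 1)) ++ t.drop (pvL pre post - 1) from rfl,
                      ← hold_take]
                  have hmatch : pvMatch pre post y y (c :: t) = true := by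
                    rw [hs_eq]
                    exact match_of_old_prefix pre post (by omega) (by omega) le_rfl le_rfl _
                  exact h2 hmatch
                · rw [not_le] at hlen
                  rw [List.take_of_length_le (by omega), List.drop_eq_nil_of_le (by omega),
                    scan_nil] at hp
                  have hle := hp.length_le
                  rw [hLold] at hle
                  simp at hle
                  omega
  exact key s.length s le_rfl

theorem foldl_repl_eq_scan (pre post : List Char)
    (Hnlp : '\n' ∉ pre) (Hnlq : '\n' ∉ post)
    (Hov : ∀ s j, shp pre post s = true → 1 ≤ j → j < pvL pre post →
      shp pre post (s.drop j) = false) (s : List Char) :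
    pvYears.foldl (fun s y =>
      repl (pre ++ chars4 y ++ post) (pre ++ chars4 y ++ post ++ ['\n']) s) s =
    pvScanG pre post 1900 2019 s := by
  have key : ∀ k : Nat, k ≤ 120 →
      (PySem.List.pyRange 1900 (1900 + (k : Int)) 1).foldl
        (fun s y => repl (pre ++ chars4 y ++ post) (pre ++ chars4 y ++ post ++ ['\n']) s) s =
      pvScanG pre post 1900 (1899 + (k : Int)) s := by
    intro k
    induction k with
    | zero =>
      intro _
      rw [show ((1900 : Int) + ((0 : Nat) : Int)) = 1900 by norm_num,
        PySem.List.pyRange_one_eq_nil (by norm_num), List.foldl_nil]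
      rw [show ((1899 : Int) + ((0 : Nat) : Int)) = 1899 by norm_num]
      exact (scan_empty_range pre post 1900 1899 (by norm_num) s).symm
    | succ k ih =>
      intro hk
      rw [show ((1900 : Int) + ((k + 1 : Nat) : Int)) = (1900 + (k : Int)) + 1 by push_cast; ring]
      rw [PySem.List.pyRange_one_succ_right (by omega), List.foldl_append, List.foldl_cons,
        List.foldl_nil, ih (by omega)]
      have hstep := repl_scan_step pre post Hnlp Hnlq Hov 1900 (1900 + (k : Int))
        (by norm_num) (by omega) (by omega) s
      rw [show (1900 + (k : Int)) - 1 = 1899 + (k : Int) by ring] at hstep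
      rw [hstep]
      rw [show (1899 : Int) + ((k + 1 : Nat) : Int) = 1900 + (k : Int) by push_cast; ring]
  have h120 := key 120 le_rfl
  rw [show ((1900 : Int) + ((120 : Nat) : Int)) = 2020 by norm_num,
    show ((1899 : Int) + ((120 : Nat) : Int)) = 2019 by norm_num] at h120
  exact h120

theorem hov_paren : ∀ s j, shp ['('] [')'] s = true → 1 ≤ j → j < pvL ['('] [')'] →
    shp ['('] [')'] (s.drop j) = false := by
  intro s j hs h1 h2
  obtain ⟨a, b, c, d, t, rfl, ha, hb, hc, hd, -, -⟩ := pvMatch_extract hs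
  simp only [pvL, List.length_cons, List.length_nil] at h2
  have ha' := digit_bounds ha
  have hb' := digit_bounds hb
  have hc' := digit_bounds hc
  have hd' := digit_bounds hd
  have e40 : ('(').toNat = 40 := rfl
  rw [Bool.eq_false_iff]
  intro hsh
  obtain ⟨a2, b2, c2, d2, t2, heq, ha2, hb2, hc2, hd2, -, -⟩ := pvMatch_extract hsh
  simp only [List.cons_append, List.nil_append] at heq
  interval_cases j <;>
    simp only [List.drop_succ_cons, List.drop_zero] at heq
  · injection heq with e _
    have := congrArg Char.toNat e
    omega
  · injection heq with e _
    have := congrArg Char.toNat e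
    omega
  · injection heq with e _
    have := congrArg Char.toNat e
    omega
  · injection heq with e _
    have := congrArg Char.toNat e
    omega
  · injection heq with e _
    exact absurd e (by decide)

theorem hov_dot : ∀ s j, shp [] ['.'] s = true → 1 ≤ j → j < pvL [] ['.'] →
    shp [] ['.'] (s.drop j) = false := by
  intro s j hs h1 h2
  obtain ⟨a, b, c, d, t, rfl, ha, hb, hc, hd, -, -⟩ := pvMatch_extract hs
  simp only [pvL, List.length_cons, List.length_nil] at h2
  have e46 : ('.').toNat = 46 := rfl
  rw [Bool.eq_false_iff]
  intro hsh
  obtain ⟨a2, b2, c2, d2, t2, heq, ha2, hb2, hc2, hd2, -, -⟩ := pvMatch_extract hsh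
  have ha2' := digit_bounds ha2
  have hb2' := digit_bounds hb2
  have hc2' := digit_bounds hc2
  have hd2' := digit_bounds hd2
  simp only [List.cons_append, List.nil_append] at heq
  interval_cases j <;>
    simp only [List.drop_succ_cons, List.drop_zero] at heq
  · injection heq with _ heq; injection heq with _ heq; injection heq with _ heq
    injection heq with e _
    have := congrArg Char.toNat e
    omega
  · injection heq with _ heq; injection heq with _ heq; injection heq with e _
    have := congrArg Char.toNat e
    omega
  · injection heq with _ heq; injection heq with e _
    have := congrArg Char.toNat e
    omega
  · injection heq with e _
    have := congrArg Char.toNat e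
    omega

theorem aParen_eq_scan (s : List Char) : pvAParen s = pvScanG ['('] [')'] 1900 2019 s := by
  have step1 : pvAParen s = pvYears.foldl
      (fun s y => repl (['('] ++ chars4 y ++ [')']) (['('] ++ chars4 y ++ [')'] ++ ['\n']) s) s := by
    unfold pvAParen
    apply PySem.List.foldl_congr_mem
    intro acc y hy
    rw [toChars_eq_chars4 y hy]
    by_cases hin : PySem.Chars.isIn (chars4 y) acc = true
    · rw [if_pos hin, replace_eq_repl _ _ _ (by simp)]
      congr 1
    · have hin' : PySem.Chars.isIn (chars4 y) acc = false := by simpa using hin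
      rw [if_neg (by simp [hin'])]
      refine (repl_of_not_infix _ ?_).symm
      intro hinf
      have hsub : chars4 y <:+: acc :=
        List.IsInfix.trans ⟨['('], [')'], by simp⟩ hinf
      exact (PySem.Chars.isIn_eq_false_iff _ _).mp hin' hsub
  rw [step1]
  exact foldl_repl_eq_scan ['('] [')'] (by decide) (by decide) hov_paren s

theorem aDot_eq_scan (s : List Char) : pvADot s = pvScanG [] ['.'] 1900 2019 s := by
  have step1 : pvADot s = pvYears.foldl
      (fun s y => repl ([] ++ chars4 y ++ ['.']) ([] ++ chars4 y ++ ['.'] ++ ['\n']) s) s := by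
    unfold pvADot
    apply PySem.List.foldl_congr_mem
    intro acc y hy
    rw [toChars_eq_chars4 y hy]
    by_cases hin : PySem.Chars.isIn (chars4 y) acc = true
    · rw [if_pos hin, replace_eq_repl _ _ _ (by simp [chars4])]
      congr 1
    · have hin' : PySem.Chars.isIn (chars4 y) acc = false := by simpa using hin
      rw [if_neg (by simp [hin'])]
      refine (repl_of_not_infix _ ?_).symm
      intro hinf
      have hsub : chars4 y <:+: acc :=
        List.IsInfix.trans ⟨[], ['.'], by simp⟩ hinf
      exact (PySem.Chars.isIn_eq_false_iff _ _).mp hin' hsub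
  rw [step1]
  exact foldl_repl_eq_scan [] ['.'] (by decide) (by decide) hov_dot s

theorem core_eq (l : List Char) : pvACore l = pvBCore l := by
  unfold pvACore pvBCore
  by_cases h : PySem.Chars.isIn " references".toList (PySem.Chars.lower l) = true <;>
    simp only [h, if_true, if_false, Bool.false_eq_true, aParen_eq_scan, aDot_eq_scan]

-- ===== VERDICT (by name: the statement is the Claim_ definition above) =====
theorem Biblio_spec : Claim_equal_Biblio := by
  intro s _
  show Biblio s = Biblio_alt s
  unfold Biblio Biblio_alt
  rw [core_eq]
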